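-- pv_equiv track=rewrite | github.com/Electric-Whelk/LandFill | Code/Backend/simulation_objects/GameCards/Spell.py | parse_cmc
-- ===== SOURCE A (Python) =====
-- def parse_cmc(input:list[dict[str, int]]) -> list[int]:
--     output = []
--     for face in input:
--         wubrg = [x for x in face.keys() if x != "X"]
--         cost = 0
--         for w in wubrg:
--             cost += face[w]
--         output.append(cost)
--     return output
-- ===== SOURCE B (Python) =====
-- def parse_cmc(input: list[dict[str, int]]) -> list[int]:
--     # Staged column-wise computation instead of A's per-face accumulator loop:
--     # pass 1: grand total of every face; pass 2: each face's generic "X" cost;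
--     # pass 3: subtract the two columns (inclusion-exclusion).
--     totals = [sum(face.values()) for face in input]
--     generic = [face.get("X", 0) for face in input]
--     return [t - x for t, x in zip(totals, generic)]
-- ===== Notes on version B (the rewrite author's own statement) =====
-- stated objective: alternative
-- what changed: Replaces A's single pass with a per-face key-filtering accumulator by three staged vector passes: a column of grand totals, a column of generic 'X' costs, and a final zip that subtracts them (inclusion-exclusion instead of per-key skipping).
import Mathlib
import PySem

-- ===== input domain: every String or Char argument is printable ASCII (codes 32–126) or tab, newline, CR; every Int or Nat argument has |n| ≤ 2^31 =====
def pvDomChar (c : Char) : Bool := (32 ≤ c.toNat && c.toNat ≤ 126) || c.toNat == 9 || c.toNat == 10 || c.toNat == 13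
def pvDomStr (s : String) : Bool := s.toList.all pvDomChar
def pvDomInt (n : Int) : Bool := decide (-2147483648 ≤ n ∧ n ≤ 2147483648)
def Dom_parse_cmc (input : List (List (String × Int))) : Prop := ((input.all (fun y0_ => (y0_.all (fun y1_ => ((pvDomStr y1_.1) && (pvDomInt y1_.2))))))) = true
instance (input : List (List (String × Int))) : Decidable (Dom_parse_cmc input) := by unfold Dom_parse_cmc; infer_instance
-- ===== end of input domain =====

-- B replaces A's per-face key-filtering accumulator loop with three staged column
-- passes (grand totals, "X" costs, zip-subtract); objective: alternative decomposition.

-- ===== PORT A =====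
-- each face is a Python dict, modelled as PySem.Dict built from its pair list
def parse_cmc (input : List (List (String × Int))) : List Int :=
  input.foldl (fun output face =>
    let d := PySem.Dict.ofList face
    let wubrg := d.keys.filter (fun x => x ≠ "X")
    let cost := wubrg.foldl (fun c w => c + d.getD w 0) 0
    output ++ [cost]) []

-- ===== PORT B =====
def parse_cmc_alt (input : List (List (String × Int))) : List Int :=
  let totals := input.map (fun face => (PySem.Dict.ofList face).values.sum)
  let generic := input.map (fun face => (PySem.Dict.ofList face).getD "X" 0)
  List.zipWith (fun t x => t - x) totals generic

-- ===== PRECONDITION & SPEC =====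
def Spec_parse_cmc (input : List (List (String × Int))) (out : List Int) : Prop := out = parse_cmc_alt input
instance (input : List (List (String × Int))) (out : List Int) : Decidable (Spec_parse_cmc input out) := by unfold Spec_parse_cmc; infer_instance

-- ===== CLAIM (what is proved, stated in full; the proofs are below) =====
def Claim_equal_parse_cmc : Prop := ∀ (input : List (List (String × Int))), Dom_parse_cmc input → Spec_parse_cmc input (parse_cmc input)

-- ===== LEMMAS AND PROOFS =====

-- summing a function over the keys ≠ "X" of a duplicate-free key list = total sum minus the "X" term
theorem filter_ne_sum (ks : List String) (g : String → Int) (hnd : ks.Nodup) :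
    ((ks.filter (fun x => x ≠ "X")).map g).sum
      = (ks.map g).sum - (if "X" ∈ ks then g "X" else 0) := by
  induction ks with
  | nil => simp
  | cons k ks ih =>
    rcases List.nodup_cons.mp hnd with ⟨hk, hnd'⟩
    by_cases hX : k = "X"
    · subst hX
      rw [List.filter_cons_of_neg (by simp), ih hnd', if_neg hk,
          if_pos (List.mem_cons_self), List.map_cons, List.sum_cons]
      ring
    · simp only [List.filter_cons, List.map_cons, List.sum_cons, List.mem_cons]
      rw [if_pos (by simp [hX]), List.map_cons, List.sum_cons, ih hnd']
      have : ("X" = k ∨ "X" ∈ ks) ↔ "X" ∈ ks :=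
        or_iff_right (fun h => hX h.symm)
      simp only [this]
      ring

theorem face_cost_eq (face : List (String × Int)) :
    (((PySem.Dict.ofList face).keys.filter (fun x => x ≠ "X")).foldl
        (fun c w => c + (PySem.Dict.ofList face).getD w 0) 0)
      = (PySem.Dict.ofList face).values.sum - (PySem.Dict.ofList face).getD "X" 0 := by
  set d := PySem.Dict.ofList face with hd
  have hnd : d.keys.Nodup := PySem.Dict.nodup_keys_ofList face
  rw [PySem.List.foldl_add, PySem.Dict.values_eq_map_keys d hnd 0,
      filter_ne_sum d.keys (fun k => d.getD k 0) hnd]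
  by_cases hX : "X" ∈ d.keys
  · simp [hX]
  · have h0 : d.getD "X" 0 = 0 := by
      apply PySem.Dict.getD_of_not_contains
      simp [PySem.Dict.contains_eq_decide_mem_keys, hX]
    simp [hX, h0]

-- B's zip of the two columns collapses to a single map over the faces
theorem alt_eq_map (input : List (List (String × Int))) :
    parse_cmc_alt input
      = input.map (fun face =>
          (PySem.Dict.ofList face).values.sum - (PySem.Dict.ofList face).getD "X" 0) := by
  unfold parse_cmc_alt
  induction input with
  | nil => simp
  | cons f fs ih => simp [ih]

-- ===== VERDICT (by name: the statement is the Claim_ definition above) =====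
theorem parse_cmc_spec : Claim_equal_parse_cmc := by
  intro input _
  unfold Spec_parse_cmc
  rw [alt_eq_map]
  unfold parse_cmc
  rw [PySem.List.foldl_append_singleton_eq_map]
  exact List.map_congr_left (fun face _ => face_cost_eq face)
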